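-- pv_equiv track=rewrite | github.com/SJWallace/AdventOfCode2024 | Day7.py | generate_test_equations
-- ===== SOURCE A (Python) =====
-- from itertools import product
--
-- def generate_test_equations(operators, concat=False):
-- 	"""
--     Generates all possible equations by placing +, *, and || between operators.
--     """
-- 	if len(operators) == 1:
-- 		return [str(operators[0])]  # Base case: only one number
--
-- 	# Generate all possible sequences of +, *, and || for (n-1) positions
-- 	if concat is False:
-- 		operator_symbols = ['+', '*']
-- 	else:
-- 		operator_symbols = ['+', '*', '||']
--
-- 	symbol_combinations = list(product(operator_symbols, repeat=len(operators) - 1))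
--
-- 	equations = []
-- 	for symbols in symbol_combinations:
-- 		equation = str(operators[0])  # Start with the first number
-- 		for i, symbol in enumerate(symbols):
-- 			equation += f" {symbol} {operators[i + 1]}"  # Add operator and next number
-- 		equations.append(equation)
--
-- 	return equations
-- ===== SOURCE B (Python) =====
-- def generate_test_equations(operators, concat=False):
--     """
--     Generates all possible equations by placing +, *, and || between operators.
--     Incremental build: extend every partial equation with each operator symbol
--     and the next number, instead of materialising itertools.product tuples.
--     """
--     first, *rest = operators
--     operator_symbols = ['+', '*', '||'] if concat else ['+', '*']
--     results = [str(first)]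
--     for num in rest:
--         results = [eq + f" {op} {num}" for eq in results for op in operator_symbols]
--     return results
-- ===== Notes on version B (the rewrite author's own statement) =====
-- stated objective: simpler
-- what changed: Replaced the itertools.product tuple enumeration plus index-based string reconstruction with an incremental left-to-right build that extends every partial equation with each symbol and the next number, eliminating the explicit symbol-combination list, the enumerate/index lookups and the separate length-1 base case.
import Mathlib
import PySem

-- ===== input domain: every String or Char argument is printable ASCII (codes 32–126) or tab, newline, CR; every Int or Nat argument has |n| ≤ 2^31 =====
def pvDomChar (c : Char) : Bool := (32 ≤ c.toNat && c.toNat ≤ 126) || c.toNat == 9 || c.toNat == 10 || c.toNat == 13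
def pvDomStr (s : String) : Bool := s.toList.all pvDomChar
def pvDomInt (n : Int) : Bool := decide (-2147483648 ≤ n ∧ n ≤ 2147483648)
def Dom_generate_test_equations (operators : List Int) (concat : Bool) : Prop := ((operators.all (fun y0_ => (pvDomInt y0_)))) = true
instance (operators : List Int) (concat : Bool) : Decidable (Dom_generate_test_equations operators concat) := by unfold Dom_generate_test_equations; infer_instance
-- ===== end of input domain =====

-- B replaces A's itertools.product tuple enumeration + enumerate/index string
-- reconstruction by an incremental left-to-right build of the equation strings (simpler decomposition).


-- ===== PORT A =====
-- itertools.product(symbols, repeat=n): tuples built left to right, last slot varies fastest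
def pvProdRepeat (syms : List String) : Nat → List (List String)
  | 0 => [[]]
  | n + 1 => (pvProdRepeat syms n).flatMap (fun x => syms.map (fun y => x ++ [y]))

def generate_test_equations (operators : List Int) (concat : Bool) : List String :=
  if operators.length = 1 then
    [PySem.Int.toStr (PySem.List.pyGetD operators 0 0)]
  else
    let operator_symbols := if concat = false then ["+", "*"] else ["+", "*", "||"]
    let symbol_combinations := pvProdRepeat operator_symbols (operators.length - 1)
    symbol_combinations.foldl
      (fun equations symbols =>
        equations ++
          [(PySem.List.enumerate symbols 0).foldl
              (fun equation p =>
                equation ++ " " ++ p.2 ++ " " ++ PySem.Int.toStr (PySem.List.pyGetD operators (p.1 + 1) 0))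
              (PySem.Int.toStr (PySem.List.pyGetD operators 0 0))])
      []

-- ===== PORT B =====
def generate_test_equations_alt (operators : List Int) (concat : Bool) : List String :=
  match operators with
  | [] => []   -- Python B raises ValueError here (tuple unpacking); outside Pre_
  | first :: rest =>
    let operator_symbols := if concat then ["+", "*", "||"] else ["+", "*"]
    rest.foldl
      (fun results num =>
        results.flatMap (fun eq =>
          operator_symbols.map (fun op => eq ++ " " ++ op ++ " " ++ PySem.Int.toStr num)))
      [PySem.Int.toStr first]

-- ===== PRECONDITION & SPEC =====
-- Pre_ excludes only the empty list, on which BOTH Pythons raise ValueError (A via product(repeat=-1), B via unpacking).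
def Pre_generate_test_equations (operators : List Int) (concat : Bool) : Prop := operators ≠ []
instance (operators : List Int) (concat : Bool) : Decidable (Pre_generate_test_equations operators concat) := by unfold Pre_generate_test_equations; infer_instance
def pvWitness_generate_test_equations : List Int × Bool := ([3, 5, 7], true)

def Spec_generate_test_equations (operators : List Int) (concat : Bool) (out : List String) : Prop := out = generate_test_equations_alt operators concat
instance (operators : List Int) (concat : Bool) (out : List String) : Decidable (Spec_generate_test_equations operators concat out) := by unfold Spec_generate_test_equations; infer_instance

-- ===== CLAIM (what is proved, stated in full; the proofs are below) =====
def Claim_equal_generate_test_equations : Prop := ∀ (operators : List Int) (concat : Bool), Dom_generate_test_equations operators concat → Pre_generate_test_equations operators concat → Spec_generate_test_equations operators concat (generate_test_equations operators concat)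

-- ===== LEMMAS AND PROOFS =====

-- every tuple produced by product(syms, repeat=n) has length n
theorem pvProdRepeat_length (syms : List String) (n : Nat) :
    ∀ x ∈ pvProdRepeat syms n, x.length = n := by
  induction n with
  | zero => intro x hx; simp [pvProdRepeat] at hx; simp [hx]
  | succ n ih =>
    intro x hx
    simp only [pvProdRepeat, List.mem_flatMap, List.mem_map] at hx
    obtain ⟨a, ha, y, _, rfl⟩ := hx
    simp [ih a ha]

-- A's enumerate/index fold equals the zip fold once the symbols cover rest exactly
theorem enum_fold_eq_zip_fold (first : Int) (rest : List Int) :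
    ∀ (sy : List String) (s : Nat) (acc : String), sy.length + s = rest.length →
    (PySem.List.enumerate sy (s : Int)).foldl
        (fun equation p =>
          equation ++ " " ++ p.2 ++ " " ++ PySem.Int.toStr (PySem.List.pyGetD (first :: rest) (p.1 + 1) 0))
        acc
      = (sy.zip (rest.drop s)).foldl
          (fun eq p => eq ++ " " ++ p.1 ++ " " ++ PySem.Int.toStr p.2) acc := by
  intro sy
  induction sy with
  | nil => intro s acc _; simp [PySem.List.enumerate_nil]
  | cons x sy' ih =>
    intro s acc h
    have hs : s < rest.length := by simp at h; omega
    have hdrop : rest.drop s = rest[s] :: rest.drop (s + 1) :=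
      List.drop_eq_getElem_cons hs
    have hcast : ((s : Int) + 1) = ((s + 1 : Nat) : Int) := by push_cast; ring
    have hget : PySem.List.pyGetD (first :: rest) ((s : Int) + 1) 0 = rest[s] := by
      rw [hcast, PySem.List.pyGetD_natCast]
      simp [List.getD_eq_getElem?_getD, hs]
    rw [PySem.List.enumerate_cons]
    simp only [List.foldl_cons, hget, hdrop, List.zip_cons_cons]
    rw [hcast, ih (s + 1) _ (by simp at h ⊢; omega)]

-- B's incremental build equals mapping the zip fold over all symbol tuples
theorem build_eq_map_prod (syms : List String) (e0 : String) (rest : List Int) :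
    rest.foldl
        (fun results num =>
          results.flatMap (fun eq => syms.map (fun op => eq ++ " " ++ op ++ " " ++ PySem.Int.toStr num)))
        [e0]
      = (pvProdRepeat syms rest.length).map
          (fun sy => (sy.zip rest).foldl (fun eq p => eq ++ " " ++ p.1 ++ " " ++ PySem.Int.toStr p.2) e0) := by
  induction rest using List.reverseRecOn with
  | nil => simp [pvProdRepeat]
  | append_singleton r num ih =>
    rw [List.foldl_append, List.foldl_cons, List.foldl_nil, ih]
    have hl : (r ++ [num]).length = r.length + 1 := by simp
    rw [hl]
    simp only [pvProdRepeat]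
    rw [List.map_flatMap, List.flatMap_map]
    refine List.flatMap_congr ?_
    intro x hx
    have hlen : x.length = r.length := pvProdRepeat_length syms r.length x hx
    rw [List.map_map]
    apply List.map_congr_left
    intro y _
    simp only [Function.comp_apply]
    rw [List.zip_append hlen, List.foldl_append]
    simp

-- ===== VERDICT (by name: the statement is the Claim_ definition above) =====
theorem generate_test_equations_spec : Claim_equal_generate_test_equations := by
  intro operators concat _ hpre
  unfold Spec_generate_test_equations
  cases operators with
  | nil => exact absurd rfl hpre
  | cons first rest =>
    cases rest with
    | nil =>
      simp [generate_test_equations, generate_test_equations_alt, PySem.List.pyGetD_zero_cons]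
    | cons num rest' =>
      have hne : ¬ (first :: num :: rest').length = 1 := by simp
      have hsyms : (if concat = false then ["+", "*"] else ["+", "*", "||"])
          = (if concat then ["+", "*", "||"] else ["+", "*"]) := by cases concat <;> rfl
      simp only [generate_test_equations, generate_test_equations_alt, if_neg hne, hsyms,
        PySem.List.pyGetD_zero_cons]
      rw [PySem.List.foldl_append_singleton_eq_map]
      have hl : (first :: num :: rest').length - 1 = (num :: rest').length := by simp
      rw [hl, build_eq_map_prod]
      apply List.map_congr_left
      intro sy hsy
      have hlen : sy.length = (num :: rest').length :=
        pvProdRepeat_length _ _ sy hsy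
      have := enum_fold_eq_zip_fold first (num :: rest') sy 0
        (PySem.Int.toStr first) (by omega)
      simpa using this
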